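-- pv_equiv track=rewrite | github.com/spicylemonade/algorithmic | src/tile_placement.py | verify_configuration
-- ===== SOURCE A (Python) =====
-- def verify_configuration(n: int, num_tiles: int) -> bool:
--     """
--     Verify that a configuration with num_tiles tiles can satisfy the constraints.
--
--     This constructs an actual tiling to prove the answer is achievable.
--
--     Configuration used (diagonal uncovered pattern):
--     - Uncovered squares at positions (i, i) for i in [0, n-1]
--     - Upper triangular region covered by n-1 horizontal tiles
--     - Lower triangular region covered by n-1 horizontal tiles
--
--     Args:
--         n: Grid size
--         num_tiles: Number of tiles to verify
--
--     Returns: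
--         True if valid configuration exists
--     """
--     expected_min = 2 * n - 2
--
--     if num_tiles < expected_min:
--         return False
--
--     # Construct the tiling with diagonal uncovered pattern
--     # Grid[i][i] is uncovered for all i
--
--     tiles = []
--
--     # Upper region: For each row i, cover columns [i+1, n-1]
--     for i in range(n - 1):
--         if i + 1 < n:
--             # Tile covering row i, columns [i+1, n-1]
--             tiles.append({
--                 'row_start': i,
--                 'row_end': i,
--                 'col_start': i + 1,
--                 'col_end': n - 1,
--                 'width': n - 1 - i,
--                 'height': 1
--             })
--
--     # Lower region: For each row i, cover columns [0, i-1]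
--     for i in range(1, n):
--         if i > 0:
--             # Tile covering row i, columns [0, i-1]
--             tiles.append({
--                 'row_start': i,
--                 'row_end': i,
--                 'col_start': 0,
--                 'col_end': i - 1,
--                 'width': i,
--                 'height': 1
--             })
--
--     # Verify we have the right number of tiles
--     if len(tiles) != expected_min:
--         return False
--
--     # Verify coverage: create a grid
--     grid = [[False] * n for _ in range(n)]
--
--     # Mark uncovered squares (diagonal)
--     uncovered = set()
--     for i in range(n):
--         uncovered.add((i, i))
--
--     # Place tiles
--     for tile in tiles:
--         for r in range(tile['row_start'], tile['row_end'] + 1):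
--             for c in range(tile['col_start'], tile['col_end'] + 1):
--                 if grid[r][c]:
--                     return False  # Overlap detected
--                 if (r, c) in uncovered:
--                     return False  # Covering an uncovered square
--                 grid[r][c] = True
--
--     # Verify each row and column has exactly one uncovered square
--     for i in range(n):
--         row_uncovered = sum(1 for j in range(n) if not grid[i][j])
--         col_uncovered = sum(1 for j in range(n) if not grid[j][i])
--
--         if row_uncovered != 1 or col_uncovered != 1:
--             return False
--
--     return True
-- ===== SOURCE B (Python) =====
-- def verify_configuration(n: int, num_tiles: int) -> bool:
--     # The diagonal construction A simulates always succeeds for n >= 1 and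
--     # always uses exactly 2n-2 tiles, so the answer is a closed-form test.
--     return n >= 1 and num_tiles >= 2 * n - 2
-- ===== Notes on version B (the rewrite author's own statement) =====
-- stated objective: simpler
-- what changed: Replaced A's explicit construction-and-verification of the diagonal tiling (building 2n-2 tiles, an n-by-n grid, placing every cell and recounting every row/column) by the closed-form test 'n >= 1 and num_tiles >= 2*n-2', proved equal for all inputs.
import Mathlib
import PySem

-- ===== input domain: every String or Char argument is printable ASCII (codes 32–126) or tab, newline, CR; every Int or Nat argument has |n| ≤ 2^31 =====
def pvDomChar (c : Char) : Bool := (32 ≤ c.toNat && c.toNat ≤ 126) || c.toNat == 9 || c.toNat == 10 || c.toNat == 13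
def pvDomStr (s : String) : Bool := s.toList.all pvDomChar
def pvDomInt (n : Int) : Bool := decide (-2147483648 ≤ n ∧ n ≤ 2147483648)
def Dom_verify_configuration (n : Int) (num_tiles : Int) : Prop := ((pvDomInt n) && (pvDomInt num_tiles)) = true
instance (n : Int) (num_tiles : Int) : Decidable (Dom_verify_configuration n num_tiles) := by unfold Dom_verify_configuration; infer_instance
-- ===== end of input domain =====

-- B replaces A's construct-and-verify simulation of the diagonal tiling by the
-- closed-form test it always amounts to: n >= 1 and num_tiles >= 2n-2 (simpler).

-- ===== PORT A =====
-- The tile dicts of A (six fixed keys) become a structure with the same six fields.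
structure PVTile where
  row_start : Int
  row_end : Int
  col_start : Int
  col_end : Int
  width : Int
  height : Int
deriving DecidableEq, Repr

-- A's n×n boolean grid is modelled as a total function Int → Int → Bool
-- (initially all False); the algorithm only ever indexes it at 0 ≤ r,c < n,
-- where this is exact for Python's list-of-lists. Cell assignment:
def pvSetCell (g : Int → Int → Bool) (r c : Int) : Int → Int → Bool :=
  fun r' c' => if r' = r ∧ c' = c then true else g r' c'

-- the two nested placement loops over one tile, with Python's early
-- 'return False' (overlap / covering an uncovered square) modelled by none
def pvPlaceTile (unc : PySem.Set (Int × Int)) (st : Option (Int → Int → Bool))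
    (t : PVTile) : Option (Int → Int → Bool) :=
  (PySem.List.pyRange t.row_start (t.row_end + 1) 1).foldl (fun st r =>
    (PySem.List.pyRange t.col_start (t.col_end + 1) 1).foldl (fun st c =>
      st.bind (fun g =>
        if g r c then none
        else if PySem.Set.contains unc (r, c) then none
        else some (pvSetCell g r c))) st) st

def verify_configuration (n : Int) (num_tiles : Int) : Bool :=
  let expected_min := 2 * n - 2
  if num_tiles < expected_min then false
  else
    -- upper region tiles
    let tilesU := (PySem.List.pyRange 0 (n - 1) 1).foldl (fun acc i =>
      if i + 1 < n then acc ++ [⟨i, i, i + 1, n - 1, n - 1 - i, 1⟩] else acc)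
      ([] : List PVTile)
    -- lower region tiles
    let tiles := (PySem.List.pyRange 1 n 1).foldl (fun acc i =>
      if i > 0 then acc ++ [⟨i, i, 0, i - 1, i, 1⟩] else acc) tilesU
    if (tiles.length : Int) ≠ expected_min then false
    else
      let unc := (PySem.List.pyRange 0 n 1).foldl
        (fun s i => PySem.Set.add s (i, i)) (PySem.Set.empty)
      match tiles.foldl (pvPlaceTile unc) (some (fun _ _ => false)) with
      | none => false
      | some g =>
        (PySem.List.pyRange 0 n 1).all (fun i =>
          let row_uncovered := (PySem.List.pyRange 0 n 1).foldl
            (fun acc j => acc + (if ¬ g i j then 1 else 0)) (0 : Int)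
          let col_uncovered := (PySem.List.pyRange 0 n 1).foldl
            (fun acc j => acc + (if ¬ g j i then 1 else 0)) (0 : Int)
          row_uncovered == 1 && col_uncovered == 1)

-- ===== PORT B =====
def verify_configuration_alt (n : Int) (num_tiles : Int) : Bool :=
  n ≥ 1 && num_tiles ≥ 2 * n - 2

-- ===== PRECONDITION & SPEC =====
def Spec_verify_configuration (n : Int) (num_tiles : Int) (out : Bool) : Prop := out = verify_configuration_alt n num_tiles
instance (n : Int) (num_tiles : Int) (out : Bool) : Decidable (Spec_verify_configuration n num_tiles out) := by unfold Spec_verify_configuration; infer_instance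

-- ===== CLAIM (what is proved, stated in full; the proofs are below) =====
def Claim_equal_verify_configuration : Prop := ∀ (n : Int) (num_tiles : Int), Dom_verify_configuration n num_tiles → Spec_verify_configuration n num_tiles (verify_configuration n num_tiles)

-- ===== LEMMAS AND PROOFS =====

-- a build loop 'if P i: acc.append(f i)' whose condition holds on every element is init ++ map
theorem pvFoldAppendIf {α β : Type} (P : α → Prop) [DecidablePred P] (f : α → β) :
    ∀ (l : List α) (init : List β), (∀ x ∈ l, P x) →
      l.foldl (fun acc i => if P i then acc ++ [f i] else acc) init = init ++ l.map f := by
  intro l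
  induction l with
  | nil => intro init _; simp
  | cons x xs ih =>
    intro init h
    simp only [List.foldl_cons, List.map_cons]
    rw [if_pos (h x (by simp)), ih _ (fun y hy => h y (by simp [hy]))]
    simp

-- membership in the uncovered set built by the fold of adds
theorem pvUncContains (n r c : Int) :
    PySem.Set.contains
      ((PySem.List.pyRange 0 n 1).foldl (fun s i => PySem.Set.add s (i, i)) PySem.Set.empty)
      (r, c) = decide (0 ≤ r ∧ r < n ∧ c = r) := by
  rw [Bool.eq_iff_iff, PySem.Set.contains_iff, decide_eq_true_iff, PySem.Set.mem_foldl_add]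
  simp only [PySem.List.mem_pyRange_one, PySem.Set.empty, List.not_mem_nil, false_or, Prod.mk.injEq]
  constructor
  · rintro ⟨i, ⟨h0, h1⟩, rfl, rfl⟩; omega
  · rintro ⟨h0, h1, rfl⟩; exact ⟨c, ⟨h0, h1⟩, rfl, rfl⟩

theorem pvDecideCongr (p q : Prop) [Decidable p] [Decidable q] (h : p ↔ q) : decide p = decide q :=
  decide_eq_decide.mpr h

-- the inner column loop over [a, a+k) on row r, when every visited cell is free and not uncovered
theorem pvRowFold (unc : PySem.Set (Int × Int)) (r : Int) :
    ∀ (k : Nat) (a : Int) (g : Int → Int → Bool),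
    (∀ c, a ≤ c → c < a + k → g r c = false ∧ PySem.Set.contains unc (r, c) = false) →
    ∃ g', (PySem.List.pyRange a (a + k) 1).foldl (fun st c =>
        st.bind (fun g =>
          if g r c then none
          else if PySem.Set.contains unc (r, c) then none
          else some (pvSetCell g r c))) (some g) = some g' ∧
      ∀ r' c', g' r' c' = (g r' c' || (decide (r' = r) && decide (a ≤ c') && decide (c' < a + k))) := by
  intro k
  induction k with
  | zero =>
    intro a g _
    refine ⟨g, by rw [PySem.List.pyRange_one_eq_nil (by omega)]; rfl, ?_⟩
    intro r' c'
    rw [pvDecideCongr _ _ (show c' < a + ((0:Nat):Int) ↔ c' < a by push_cast; omega)]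
    by_cases hx : a ≤ c'
    · simp [show ¬ (c' < a) by omega]
    · simp [hx]
  | succ k ih =>
    intro a g h
    rw [PySem.List.pyRange_one_cons (by push_cast; omega), List.foldl_cons]
    have hga : g r a = false := (h a (le_refl a) (by push_cast; omega)).1
    have hua : PySem.Set.contains unc (r, a) = false := (h a (le_refl a) (by push_cast; omega)).2
    simp only [Option.bind_some, hga, hua, Bool.false_eq_true, ite_false]
    have hstep : ∀ c, a + 1 ≤ c → c < (a + 1) + (k : Int) →
        pvSetCell g r a r c = false ∧ PySem.Set.contains unc (r, c) = false := by
      intro c hc1 hc2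
      refine ⟨?_, (h c (by omega) (by push_cast; omega)).2⟩
      simp only [pvSetCell]
      rw [if_neg (by omega)]
      exact (h c (by omega) (by push_cast; omega)).1
    obtain ⟨g', hfold, hg'⟩ := ih (a + 1) (pvSetCell g r a) hstep
    have harr : a + (((k:Nat) + 1 : Nat) : Int) = (a + 1) + (k : Int) := by push_cast; ring
    refine ⟨g', by rw [harr]; exact hfold, ?_⟩
    intro r' c'
    rw [hg' r' c', harr]
    by_cases hrc : r' = r ∧ c' = a
    · rw [show pvSetCell g r a r' c' = true from by simp only [pvSetCell]; rw [if_pos hrc]]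
      have e2 : a < a + 1 + (k:Int) := by omega
      simp [hrc.1, hrc.2, hga, e2]
    · rw [show pvSetCell g r a r' c' = g r' c' from by simp only [pvSetCell]; rw [if_neg hrc]]
      by_cases hr : r' = r
      · have hca : c' ≠ a := fun hx => hrc ⟨hr, hx⟩
        rw [pvDecideCongr _ _ (show a + 1 ≤ c' ↔ a ≤ c' from by omega)]
      · simp [hr]

-- placing one single-row tile ⟨r, r, a, b, w, h⟩
theorem pvPlaceRowTile (unc : PySem.Set (Int × Int)) (r a b w ht : Int)
    (g : Int → Int → Bool)
    (h : ∀ c, a ≤ c → c ≤ b → g r c = false ∧ PySem.Set.contains unc (r, c) = false) :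
    ∃ g', pvPlaceTile unc (some g) ⟨r, r, a, b, w, ht⟩ = some g' ∧
      ∀ r' c', g' r' c' = (g r' c' || (decide (r' = r) && decide (a ≤ c') && decide (c' ≤ b))) := by
  unfold pvPlaceTile
  dsimp only
  rw [show PySem.List.pyRange r (r + 1) 1 = [r] from PySem.List.pyRange_one_singleton r,
    List.foldl_cons, List.foldl_nil]
  by_cases hab : a ≤ b + 1
  · have hk : a + (((b + 1 - a).toNat : Nat) : Int) = b + 1 := by omega
    obtain ⟨g', hfold, hg'⟩ := pvRowFold unc r (b + 1 - a).toNat a g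
      (by intro c h1 h2; exact h c h1 (by omega))
    rw [hk] at hfold hg'
    refine ⟨g', hfold, ?_⟩
    intro r' c'
    rw [hg' r' c', pvDecideCongr _ _ (show c' < b + 1 ↔ c' ≤ b from Int.lt_add_one_iff)]
  · refine ⟨g, ?_, ?_⟩
    · rw [PySem.List.pyRange_one_eq_nil (by omega)]; rfl
    · intro r' c'
      by_cases hx : a ≤ c'
      · simp [show ¬ (c' ≤ b) by omega]
      · simp [hx]


-- the fold placing the n-1 upper-region tiles (rows 0..m-1), starting from the all-false grid
theorem pvUpper (n : Int) (unc : PySem.Set (Int × Int))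
    (hunc : ∀ r c, PySem.Set.contains unc (r, c) = decide (0 ≤ r ∧ r < n ∧ c = r)) :
    ∀ (m : Nat), (m : Int) ≤ n - 1 →
    ∃ g, ((PySem.List.pyRange 0 (m : Int) 1).map
          (fun i => (⟨i, i, i + 1, n - 1, n - 1 - i, 1⟩ : PVTile))).foldl
        (pvPlaceTile unc) (some (fun _ _ => false)) = some g ∧
      ∀ r c, g r c = decide (0 ≤ r ∧ r < (m : Int) ∧ r < c ∧ c ≤ n - 1) := by
  intro m
  induction m with
  | zero =>
    intro _
    refine ⟨fun _ _ => false, by rw [PySem.List.pyRange_one_eq_nil (by omega)]; rfl, ?_⟩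
    intro r c
    have h0 : ¬ (0 ≤ r ∧ r < ((0:Nat):Int) ∧ r < c ∧ c ≤ n - 1) := by push_cast; omega
    rw [pvDecideCongr _ False (iff_false_intro h0)]
    simp
  | succ m ih =>
    intro hm
    obtain ⟨g, hfold, hg⟩ := ih (by push_cast at hm ⊢; omega)
    rw [show ((m + 1 : Nat) : Int) = (m : Int) + 1 from by push_cast; ring,
      PySem.List.pyRange_one_succ_right (by push_cast; omega), List.map_append,
      List.foldl_append, hfold, List.map_cons, List.map_nil, List.foldl_cons, List.foldl_nil]
    obtain ⟨g', hstep, hg'⟩ := pvPlaceRowTile unc (m : Int) ((m : Int) + 1) (n - 1)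
      (n - 1 - (m : Int)) 1 g (by
        intro c h1 h2
        constructor
        · rw [hg]; simp only [decide_eq_false_iff_not]; omega
        · rw [hunc]; simp only [decide_eq_false_iff_not]; omega)
    refine ⟨g', hstep, ?_⟩
    intro r c
    rw [hg' r c, hg r c]
    by_cases hr : r = (m : Int)
    · have h1 : ¬ (0 ≤ r ∧ r < (m : Int) ∧ r < c ∧ c ≤ n - 1) := by omega
      rw [pvDecideCongr (0 ≤ r ∧ r < (m : Int) + 1 ∧ r < c ∧ c ≤ n - 1)
        ((m : Int) + 1 ≤ c ∧ c ≤ n - 1) (by omega)]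
      simp [hr]
    · have h2 : (0 ≤ r ∧ r < (m : Int) + 1 ∧ r < c ∧ c ≤ n - 1) ↔
        (0 ≤ r ∧ r < (m : Int) ∧ r < c ∧ c ≤ n - 1) := by omega
      rw [pvDecideCongr _ _ h2]
      simp [hr]

-- the fold placing the n-1 lower-region tiles (rows 1..m), starting from the completed upper grid
theorem pvLower (n : Int) (unc : PySem.Set (Int × Int))
    (hunc : ∀ r c, PySem.Set.contains unc (r, c) = decide (0 ≤ r ∧ r < n ∧ c = r))
    (g0 : Int → Int → Bool)
    (hg0 : ∀ r c, g0 r c = decide (0 ≤ r ∧ r < n ∧ r < c ∧ c ≤ n - 1)) :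
    ∀ (m : Nat), (m : Int) ≤ n - 1 →
    ∃ g, ((PySem.List.pyRange 1 (1 + (m : Int)) 1).map
          (fun i => (⟨i, i, 0, i - 1, i, 1⟩ : PVTile))).foldl
        (pvPlaceTile unc) (some g0) = some g ∧
      ∀ r c, g r c = (decide (0 ≤ r ∧ r < n ∧ r < c ∧ c ≤ n - 1) ||
        decide (1 ≤ r ∧ r < 1 + (m : Int) ∧ 0 ≤ c ∧ c < r)) := by
  intro m
  induction m with
  | zero =>
    intro _
    refine ⟨g0, by rw [PySem.List.pyRange_one_eq_nil (by omega)]; rfl, ?_⟩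
    intro r c
    have h0 : ¬ (1 ≤ r ∧ r < 1 + ((0:Nat):Int) ∧ 0 ≤ c ∧ c < r) := by push_cast; omega
    rw [hg0, pvDecideCongr _ False (iff_false_intro h0)]
    simp
  | succ m ih =>
    intro hm
    obtain ⟨g, hfold, hg⟩ := ih (by push_cast at hm ⊢; omega)
    rw [show (1 : Int) + ((m + 1 : Nat) : Int) = (1 + (m : Int)) + 1 from by push_cast; ring,
      PySem.List.pyRange_one_succ_right (by push_cast; omega), List.map_append,
      List.foldl_append, hfold, List.map_cons, List.map_nil, List.foldl_cons, List.foldl_nil]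
    obtain ⟨g', hstep, hg'⟩ := pvPlaceRowTile unc (1 + (m : Int)) 0 (1 + (m : Int) - 1)
      (1 + (m : Int)) 1 g (by
        intro c h1 h2
        constructor
        · rw [hg]
          simp only [Bool.or_eq_false_iff, decide_eq_false_iff_not]
          constructor <;> omega
        · rw [hunc]; simp only [decide_eq_false_iff_not]; omega)
    refine ⟨g', hstep, ?_⟩
    intro r c
    rw [hg' r c, hg r c]
    rw [Bool.or_assoc]
    by_cases hr : r = 1 + (m : Int)
    · have h1 : ¬ (1 ≤ r ∧ r < 1 + (m : Int) ∧ 0 ≤ c ∧ c < r) := by omega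
      rw [pvDecideCongr (1 ≤ r ∧ r < 1 + (m : Int) + 1 ∧ 0 ≤ c ∧ c < r)
        (0 ≤ c ∧ c ≤ 1 + (m : Int) - 1) (by omega)]
      simp [hr]
    · have h2 : (1 ≤ r ∧ r < 1 + (m : Int) + 1 ∧ 0 ≤ c ∧ c < r) ↔
        (1 ≤ r ∧ r < 1 + (m : Int) ∧ 0 ≤ c ∧ c < r) := by omega
      rw [pvDecideCongr _ _ h2]
      simp [hr]

-- a row/column uncovered count is exactly 1 when the grid marks everything except index i
theorem pvCount (n i : Int) (h0 : 0 ≤ i) (h1 : i < n) (h : Int → Bool)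
    (hh : ∀ j, 0 ≤ j → j < n → h j = decide (j ≠ i)) :
    (PySem.List.pyRange 0 n 1).foldl (fun acc j => acc + (if ¬ h j then 1 else 0)) (0 : Int) = 1 := by
  rw [show PySem.List.pyRange 0 n 1
      = PySem.List.pyRange 0 i 1 ++ (i :: PySem.List.pyRange (i + 1) n 1) from by
    rw [← PySem.List.pyRange_one_cons (show i < n from h1)]
    exact PySem.List.pyRange_one_append 0 i n h0 (by omega)]
  rw [List.foldl_append, List.foldl_cons]
  have z1 : (PySem.List.pyRange 0 i 1).foldl (fun acc j => acc + (if ¬ h j then 1 else 0)) (0 : Int) = 0 := by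
    rw [PySem.List.foldl_add, List.sum_eq_zero]
    · simp
    · intro x hx
      simp only [List.mem_map] at hx
      obtain ⟨j, hj, rfl⟩ := hx
      rw [PySem.List.mem_pyRange_one] at hj
      rw [hh j hj.1 (by omega)]
      simp [show j ≠ i from by omega]
  rw [z1]
  have hi : h i = false := by rw [hh i h0 h1]; simp
  rw [show (0 : Int) + (if ¬ h i = true then 1 else 0) = 1 from by simp [hi]]
  rw [PySem.List.foldl_add, List.sum_eq_zero]
  · simp
  · intro x hx
    simp only [List.mem_map] at hx
    obtain ⟨j, hj, rfl⟩ := hx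
    rw [PySem.List.mem_pyRange_one] at hj
    rw [hh j (by omega) hj.2]
    simp [show j ≠ i from by omega]

theorem verify_main (n num_tiles : Int) :
    verify_configuration n num_tiles = verify_configuration_alt n num_tiles := by
  unfold verify_configuration verify_configuration_alt
  by_cases h1 : num_tiles < 2 * n - 2
  · rw [if_pos h1]
    simp [show ¬ (num_tiles ≥ 2 * n - 2) from by omega]
  · rw [if_neg h1]
    dsimp only
    by_cases hn : 1 ≤ n
    · -- the two build loops are maps (the conditions always hold)
      rw [pvFoldAppendIf (fun i => i + 1 < n)
          (fun i => (⟨i, i, i + 1, n - 1, n - 1 - i, 1⟩ : PVTile))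
          (PySem.List.pyRange 0 (n - 1) 1) []
          (by intro x hx; rw [PySem.List.mem_pyRange_one] at hx; omega),
        List.nil_append,
        pvFoldAppendIf (fun i => i > 0)
          (fun i => (⟨i, i, 0, i - 1, i, 1⟩ : PVTile))
          (PySem.List.pyRange 1 n 1) _
          (by intro x hx; rw [PySem.List.mem_pyRange_one] at hx; omega)]
      have hlen : ((((PySem.List.pyRange 0 (n - 1) 1).map
            (fun i => (⟨i, i, i + 1, n - 1, n - 1 - i, 1⟩ : PVTile)) ++
          (PySem.List.pyRange 1 n 1).map
            (fun i => (⟨i, i, 0, i - 1, i, 1⟩ : PVTile))).length : Int)) = 2 * n - 2 := by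
        rw [List.length_append, List.length_map, List.length_map,
          PySem.List.length_pyRange_one, PySem.List.length_pyRange_one]
        omega
      rw [if_neg (by rw [hlen]; omega)]
      have hunc := pvUncContains n
      obtain ⟨gU, hfoldU, hgU⟩ := pvUpper n _ (fun r c => hunc r c) (n - 1).toNat (by omega)
      rw [show (((n - 1).toNat : Nat) : Int) = n - 1 from by omega] at hfoldU hgU
      have hgU' : ∀ r c, gU r c = decide (0 ≤ r ∧ r < n ∧ r < c ∧ c ≤ n - 1) :=
        fun r c => (hgU r c).trans (pvDecideCongr _ _ (by omega))
      obtain ⟨gF, hfoldL, hgF⟩ := pvLower n _ (fun r c => hunc r c) gU hgU' (n - 1).toNat (by omega)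
      rw [show (((n - 1).toNat : Nat) : Int) = n - 1 from by omega] at hfoldL hgF
      rw [show (1 : Int) + (n - 1) = n from by ring] at hfoldL hgF
      rw [List.foldl_append, hfoldU, hfoldL]
      dsimp only
      have hcell : ∀ r c, 0 ≤ r → r < n → 0 ≤ c → c < n → gF r c = decide (c ≠ r) := by
        intro r c hr0 hrn hc0 hcn
        rw [hgF]
        rcases lt_trichotomy c r with hlt | heq | hgt
        · simp [show (1 ≤ r ∧ r < n ∧ 0 ≤ c ∧ c < r) from by omega, show c ≠ r from by omega]
        · subst heq
          simp [show ¬ (0 ≤ c ∧ c < n ∧ c < c ∧ c ≤ n - 1) from by omega,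
            show ¬ (1 ≤ c ∧ c < n ∧ 0 ≤ c ∧ c < c) from by omega]
        · simp [show (0 ≤ r ∧ r < n ∧ r < c ∧ c ≤ n - 1) from by omega, show c ≠ r from by omega]
      have hall : (PySem.List.pyRange 0 n 1).all (fun i =>
          ((PySem.List.pyRange 0 n 1).foldl
            (fun acc j => acc + (if ¬ gF i j then 1 else 0)) (0 : Int) == 1) &&
          ((PySem.List.pyRange 0 n 1).foldl
            (fun acc j => acc + (if ¬ gF j i then 1 else 0)) (0 : Int) == 1)) = true := by
        rw [List.all_eq_true]
        intro i hi
        rw [PySem.List.mem_pyRange_one] at hi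
        rw [pvCount n i hi.1 hi.2 (fun j => gF i j)
            (fun j hj0 hjn => hcell i j hi.1 hi.2 hj0 hjn),
          pvCount n i hi.1 hi.2 (fun j => gF j i)
            (fun j hj0 hjn =>
              (hcell j i hj0 hjn hi.1 hi.2).trans (pvDecideCongr _ _ (by omega)))]
        simp
      rw [hall]
      simp [hn, show num_tiles ≥ 2 * n - 2 from by omega]
    · rw [PySem.List.pyRange_one_eq_nil (show n - 1 ≤ 0 from by omega),
        PySem.List.pyRange_one_eq_nil (show n ≤ 1 from by omega),
        List.foldl_nil, List.foldl_nil]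
      rw [if_pos (by simp; omega)]
      simp [hn]

-- ===== VERDICT (by name: the statement is the Claim_ definition above) =====
theorem verify_configuration_spec : Claim_equal_verify_configuration := by
  intro n num_tiles _
  exact verify_main n num_tiles
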